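-- pv_equiv track=rewrite | github.com/timctfl/skillshelf | skills/product-attribute-dictionary/scripts/summarize_catalog.py | detect_platform
-- ===== SOURCE A (Python) =====
-- def detect_platform(headers):
--     header_set = set(h.lower().strip() for h in headers)
--     signals = {
--         "shopify": {"handle", "variant sku", "variant price", "variant grams", "variant inventory qty"},
--         "bigcommerce": {"product id", "product name", "brand name", "product type", "product code/sku"},
--         "woocommerce": {"post_title", "regular_price", "sale_price", "post_status", "sku"},
--     }
--     scores = {p: len(s & header_set) for p, s in signals.items()}
--     best = max(scores, key=scores.get)
--     return best if scores[best] >= 2 else "unknown"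
-- ===== SOURCE B (Python) =====
-- def detect_platform(headers):
--     signals = {
--         "shopify": ["handle", "variant sku", "variant price", "variant grams", "variant inventory qty"],
--         "bigcommerce": ["product id", "product name", "brand name", "product type", "product code/sku"],
--         "woocommerce": ["post_title", "regular_price", "sale_price", "post_status", "sku"],
--     }
--     index = {}
--     for platform, tokens in signals.items():
--         for t in tokens:
--             index[t] = platform
--     scores = {p: 0 for p in signals}
--     for h in set(h.lower().strip() for h in headers):
--         p = index.get(h)
--         if p is not None:
--             scores[p] += 1
--     best = max(scores, key=scores.get)
--     return best if scores[best] >= 2 else "unknown"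
-- ===== Notes on version B (the rewrite author's own statement) =====
-- stated objective: alternative
-- what changed: Replaces the three per-platform set intersections with an inverted index token->platform built once and a single counting pass over the deduplicated normalized headers.
import Mathlib
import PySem

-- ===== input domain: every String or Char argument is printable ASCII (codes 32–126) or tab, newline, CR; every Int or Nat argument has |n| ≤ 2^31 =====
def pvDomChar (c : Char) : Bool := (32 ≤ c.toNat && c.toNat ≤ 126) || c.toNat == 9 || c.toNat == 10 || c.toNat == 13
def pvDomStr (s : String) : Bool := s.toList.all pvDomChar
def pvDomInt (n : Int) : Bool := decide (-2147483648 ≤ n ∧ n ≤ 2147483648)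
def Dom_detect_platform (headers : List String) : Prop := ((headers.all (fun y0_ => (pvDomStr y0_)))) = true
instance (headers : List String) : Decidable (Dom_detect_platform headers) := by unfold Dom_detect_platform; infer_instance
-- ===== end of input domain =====

-- B replaces A's three per-platform set intersections by an inverted index (token -> platform)
-- and a single counting pass over the deduplicated normalized headers; same result, similar cost.


-- ===== PORT A =====
-- 'max' on a nonempty dict never raises, so the 'none' arm of the match below is unreachable
def detect_platform (headers : List String) : String :=
  let header_set : PySem.Set String :=
    PySem.Set.ofList (headers.map (fun h => PySem.Str.strip (PySem.Str.lower h)))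
  let signals : PySem.Dict String (PySem.Set String) :=
    PySem.Dict.ofList
      [("shopify", PySem.Set.ofList ["handle", "variant sku", "variant price", "variant grams", "variant inventory qty"]),
       ("bigcommerce", PySem.Set.ofList ["product id", "product name", "brand name", "product type", "product code/sku"]),
       ("woocommerce", PySem.Set.ofList ["post_title", "regular_price", "sale_price", "post_status", "sku"])]
  let scores : PySem.Dict String Int :=
    signals.items.foldl (fun d pv => d.insert pv.1 (PySem.Set.len (PySem.Set.inter pv.2 header_set))) PySem.Dict.empty
  match PySem.List.max? scores.keys (fun p => scores.getD p 0) with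
  | some best => if scores.getD best 0 ≥ 2 then best else "unknown"
  | none => "unknown"

-- ===== PORT B =====
def pvSignalsB : List (String × List String) :=
  [("shopify", ["handle", "variant sku", "variant price", "variant grams", "variant inventory qty"]),
   ("bigcommerce", ["product id", "product name", "brand name", "product type", "product code/sku"]),
   ("woocommerce", ["post_title", "regular_price", "sale_price", "post_status", "sku"])]

def detect_platform_alt (headers : List String) : String :=
  let index : PySem.Dict String String :=
    pvSignalsB.foldl (fun d pt => pt.2.foldl (fun d t => d.insert t pt.1) d) PySem.Dict.empty
  let scores0 : PySem.Dict String Int :=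
    pvSignalsB.foldl (fun d pt => d.insert pt.1 0) PySem.Dict.empty
  let scores : PySem.Dict String Int :=
    (PySem.Set.ofList (headers.map (fun h => PySem.Str.strip (PySem.Str.lower h)))).foldl
      (fun d h =>
        match index.get? h with
        | some p => d.modify p 0 (· + 1)
        | none => d)
      scores0
  match PySem.List.max? scores.keys (fun p => scores.getD p 0) with
  | some best => if scores.getD best 0 ≥ 2 then best else "unknown"
  | none => "unknown"

-- ===== PRECONDITION & SPEC =====
def Spec_detect_platform (headers : List String) (out : String) : Prop := out = detect_platform_alt headers
instance (headers : List String) (out : String) : Decidable (Spec_detect_platform headers out) := by unfold Spec_detect_platform; infer_instance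

-- ===== CLAIM (what is proved, stated in full; the proofs are below) =====
def Claim_equal_detect_platform : Prop := ∀ (headers : List String), Dom_detect_platform headers → Spec_detect_platform headers (detect_platform headers)

-- ===== LEMMAS AND PROOFS =====

-- proof-side abbreviations
def pvS1 : List String := ["handle", "variant sku", "variant price", "variant grams", "variant inventory qty"]
def pvS2 : List String := ["product id", "product name", "brand name", "product type", "product code/sku"]
def pvS3 : List String := ["post_title", "regular_price", "sale_price", "post_status", "sku"]

def pvMk3 (a b c : Int) : PySem.Dict String Int :=
  ⟨[("shopify", a), ("bigcommerce", b), ("woocommerce", c)]⟩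

def pvIndexB : PySem.Dict String String :=
  pvSignalsB.foldl (fun d pt => pt.2.foldl (fun d t => d.insert t pt.1) d) PySem.Dict.empty

def pvStep (d : PySem.Dict String Int) (h : String) : PySem.Dict String Int :=
  match pvIndexB.get? h with
  | some p => d.modify p 0 (· + 1)
  | none => d

def pvCnt (S M : List String) : Int := (M.countP (fun x => decide (x ∈ S)) : Int)

def pvTail (scores : PySem.Dict String Int) : String :=
  match PySem.List.max? scores.keys (fun p => scores.getD p 0) with
  | some best => if scores.getD best 0 ≥ 2 then best else "unknown"
  | none => "unknown"

theorem pvCnt_cons (S : List String) (h : String) (t : List String) :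
    pvCnt S (h :: t) = pvCnt S t + (if h ∈ S then 1 else 0) := by
  simp only [pvCnt, List.countP_cons]
  split_ifs with hm <;> simp_all

theorem pv_mod_sh (a b c : Int) (f : Int → Int) :
    (pvMk3 a b c).modify "shopify" 0 f = pvMk3 (f a) b c := rfl

theorem pv_mod_bc (a b c : Int) (f : Int → Int) :
    (pvMk3 a b c).modify "bigcommerce" 0 f = pvMk3 a (f b) c := rfl

theorem pv_mod_wc (a b c : Int) (f : Int → Int) :
    (pvMk3 a b c).modify "woocommerce" 0 f = pvMk3 a b (f c) := rfl

theorem pv_get_S1 (h : String) (hm : h ∈ pvS1) : pvIndexB.get? h = some "shopify" := by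
  fin_cases hm <;> rfl

theorem pv_get_S2 (h : String) (hm : h ∈ pvS2) : pvIndexB.get? h = some "bigcommerce" := by
  fin_cases hm <;> rfl

theorem pv_get_S3 (h : String) (hm : h ∈ pvS3) : pvIndexB.get? h = some "woocommerce" := by
  fin_cases hm <;> rfl

theorem pv_get_none (h : String) (h1 : h ∉ pvS1) (h2 : h ∉ pvS2) (h3 : h ∉ pvS3) :
    pvIndexB.get? h = none := by
  simp only [pvS1, pvS2, pvS3, List.mem_cons, List.not_mem_nil, or_false, not_or] at h1 h2 h3
  obtain ⟨a1, a2, a3, a4, a5⟩ := h1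
  obtain ⟨b1, b2, b3, b4, b5⟩ := h2
  obtain ⟨c1, c2, c3, c4, c5⟩ := h3
  rw [show pvIndexB = (⟨[("handle","shopify"),("variant sku","shopify"),("variant price","shopify"),("variant grams","shopify"),("variant inventory qty","shopify"),("product id","bigcommerce"),("product name","bigcommerce"),("brand name","bigcommerce"),("product type","bigcommerce"),("product code/sku","bigcommerce"),("post_title","woocommerce"),("regular_price","woocommerce"),("sale_price","woocommerce"),("post_status","woocommerce"),("sku","woocommerce")]⟩ : PySem.Dict String String) from rfl]
  have ea1 : ("handle" == h) = false := by simp [Ne.symm a1]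
  have ea2 : ("variant sku" == h) = false := by simp [Ne.symm a2]
  have ea3 : ("variant price" == h) = false := by simp [Ne.symm a3]
  have ea4 : ("variant grams" == h) = false := by simp [Ne.symm a4]
  have ea5 : ("variant inventory qty" == h) = false := by simp [Ne.symm a5]
  have eb1 : ("product id" == h) = false := by simp [Ne.symm b1]
  have eb2 : ("product name" == h) = false := by simp [Ne.symm b2]
  have eb3 : ("brand name" == h) = false := by simp [Ne.symm b3]
  have eb4 : ("product type" == h) = false := by simp [Ne.symm b4]
  have eb5 : ("product code/sku" == h) = false := by simp [Ne.symm b5]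
  have ec1 : ("post_title" == h) = false := by simp [Ne.symm c1]
  have ec2 : ("regular_price" == h) = false := by simp [Ne.symm c2]
  have ec3 : ("sale_price" == h) = false := by simp [Ne.symm c3]
  have ec4 : ("post_status" == h) = false := by simp [Ne.symm c4]
  have ec5 : ("sku" == h) = false := by simp [Ne.symm c5]
  simp [PySem.Dict.get?, List.find?, ea1, ea2, ea3, ea4, ea5, eb1, eb2, eb3, eb4, eb5, ec1, ec2, ec3, ec4, ec5]

theorem pv_foldB (M : List String) (a b c : Int) :
    M.foldl pvStep (pvMk3 a b c)
      = pvMk3 (a + pvCnt pvS1 M) (b + pvCnt pvS2 M) (c + pvCnt pvS3 M) := by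
  induction M generalizing a b c with
  | nil => simp [pvCnt]
  | cons h t ih =>
    have inj : ∀ x y z x' y' z' : Int, x = x' → y = y' → z = z' → pvMk3 x y z = pvMk3 x' y' z' := by
      intro x y z x' y' z' hx hy hz; rw [hx, hy, hz]
    by_cases h1 : h ∈ pvS1
    · have h2 : h ∉ pvS2 := by fin_cases h1 <;> decide
      have h3 : h ∉ pvS3 := by fin_cases h1 <;> decide
      rw [List.foldl_cons, show pvStep (pvMk3 a b c) h = pvMk3 (a + 1) b c from by
          simp only [pvStep, pv_get_S1 h h1]; exact pv_mod_sh a b c (· + 1), ih,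
        pvCnt_cons, pvCnt_cons, pvCnt_cons, if_pos h1, if_neg h2, if_neg h3]
      exact inj _ _ _ _ _ _ (by ring) (by ring) (by ring)
    · by_cases h2 : h ∈ pvS2
      · have h3 : h ∉ pvS3 := by fin_cases h2 <;> decide
        rw [List.foldl_cons, show pvStep (pvMk3 a b c) h = pvMk3 a (b + 1) c from by
            simp only [pvStep, pv_get_S2 h h2]; exact pv_mod_bc a b c (· + 1), ih,
          pvCnt_cons, pvCnt_cons, pvCnt_cons, if_neg h1, if_pos h2, if_neg h3]
        exact inj _ _ _ _ _ _ (by ring) (by ring) (by ring)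
      · by_cases h3 : h ∈ pvS3
        · rw [List.foldl_cons, show pvStep (pvMk3 a b c) h = pvMk3 a b (c + 1) from by
              simp only [pvStep, pv_get_S3 h h3]; exact pv_mod_wc a b c (· + 1), ih,
            pvCnt_cons, pvCnt_cons, pvCnt_cons, if_neg h1, if_neg h2, if_pos h3]
          exact inj _ _ _ _ _ _ (by ring) (by ring) (by ring)
        · rw [List.foldl_cons, show pvStep (pvMk3 a b c) h = pvMk3 a b c from by
              simp only [pvStep, pv_get_none h h1 h2 h3], ih,
            pvCnt_cons, pvCnt_cons, pvCnt_cons, if_neg h1, if_neg h2, if_neg h3]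
          exact inj _ _ _ _ _ _ (by ring) (by ring) (by ring)

theorem pv_len_inter (S M : List String) (hS : S.Nodup) (hM : M.Nodup) :
    PySem.Set.len (PySem.Set.inter S M) = pvCnt S M := by
  simp only [PySem.Set.len, PySem.Set.inter, PySem.Set.contains, pvCnt,
    List.countP_eq_length_filter]
  norm_cast
  have e1 : (S.filter (fun x => M.contains x)) = S.filter (fun x => decide (x ∈ M)) := by
    apply List.filter_congr; intro x _; simp
  rw [e1,
    ← List.toFinset_card_of_nodup (List.Nodup.filter _ hS),
    ← List.toFinset_card_of_nodup (List.Nodup.filter _ hM),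
    List.toFinset_filter, List.toFinset_filter]
  have key : ∀ (A B : Finset String), (A.filter (fun x => x ∈ B)).card = (B.filter (fun x => x ∈ A)).card := by
    intro A B; rw [Finset.filter_mem_eq_inter, Finset.filter_mem_eq_inter, Finset.inter_comm]
  simpa using key S.toFinset M.toFinset

theorem detect_platform_spec : Claim_equal_detect_platform := by
  intro headers _
  unfold Spec_detect_platform
  have hnod : (PySem.Set.ofList (headers.map (fun h => PySem.Str.strip (PySem.Str.lower h)))).Nodup :=
    PySem.Set.nodup_ofList _
  have hA : detect_platform headers
      = pvTail (pvMk3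
          (PySem.Set.len (PySem.Set.inter pvS1 (PySem.Set.ofList (headers.map (fun h => PySem.Str.strip (PySem.Str.lower h))))))
          (PySem.Set.len (PySem.Set.inter pvS2 (PySem.Set.ofList (headers.map (fun h => PySem.Str.strip (PySem.Str.lower h))))))
          (PySem.Set.len (PySem.Set.inter pvS3 (PySem.Set.ofList (headers.map (fun h => PySem.Str.strip (PySem.Str.lower h))))))) := rfl
  have hB : detect_platform_alt headers
      = pvTail ((PySem.Set.ofList (headers.map (fun h => PySem.Str.strip (PySem.Str.lower h)))).foldl pvStep (pvMk3 0 0 0)) := rfl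
  rw [hA, hB, pv_foldB,
    pv_len_inter pvS1 _ (by decide) hnod,
    pv_len_inter pvS2 _ (by decide) hnod,
    pv_len_inter pvS3 _ (by decide) hnod,
    zero_add, zero_add, zero_add]
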